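-- pv_equiv track=rewrite | github.com/Kawhan/SocketPythonChatTest | chat/classes/cryptography_class.py | second_floor_decrypt
-- ===== SOURCE A (Python) =====
-- def second_floor_decrypt(texto_criptografado):
--     tabela_substituicao = {
--         'A': 'El', 'B': 'Fol', 'C': 'Il', 'D': 'Lol', 'E': 'Mel',
--         'F': 'Nol', 'G': 'Ol', 'H': 'Pol', 'I': 'Qol', 'J': 'Rel',
--         'K': 'Sil', 'L': 'Tel', 'M': 'Ul', 'N': 'Vol', 'O': 'Wol',
--         'P': 'Xol', 'Q': 'Yol', 'R': 'Zol', 'S': 'Al', 'T': 'Bl',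
--         'U': 'Cl', 'V': 'Dl', 'W': 'Eml', 'X': 'Fl', 'Y': 'Gl', 'Z': 'Hl',
--         'a': 'el', 'b': 'fol', 'c': 'il', 'd': 'lol', 'e': 'mel',
--         'f': 'nol', 'g': 'ol', 'h': 'pol', 'i': 'qol', 'j': 'rel',
--         'k': 'sil', 'l': 'tel', 'm': 'ul', 'n': 'vol', 'o': 'wol',
--         'p': 'xol', 'q': 'yol', 'r': 'zol', 's': 'al', 't': 'bl',
--         'u': 'cl', 'v': 'dl', 'w': 'eml', 'x': 'fl', 'y': 'gl', 'z': 'hl'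
--     }
--
--     tabela_substituicao_inversa = {
--         valor: chave for chave, valor in tabela_substituicao.items()}
--
--     decrypted_text = ""
--     i = 0
--     while i < len(texto_criptografado):
--         found_match = False
--         for tamanho in range(3, 0, -1):
--             sequencia = texto_criptografado[i:i + tamanho]
--             if sequencia in tabela_substituicao_inversa:
--                 decrypted_text += tabela_substituicao_inversa[sequencia]
--                 i += tamanho
--                 found_match = True
--                 break
--
--         if not found_match:
--             decrypted_text += texto_criptografado[i]
--             i += 1
--
--     return decrypted_text
-- ===== SOURCE B (Python) =====
-- def second_floor_decrypt(texto_criptografado):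
--     # Inverse table built from parallel letter/code sequences; decoding is a
--     # streaming one-pass decoder keeping at most two pending characters.
--     # Emitting as soon as the buffer matches a code is safe because no 2-char
--     # code is a prefix of a 3-char code (every 2-char code ends in 'l', no
--     # 3-char code has 'l' second), so a matched buffer can never grow into a
--     # longer match that A's longest-first probe would prefer.
--     letras = 'ABCDEFGHIJKLMNOPQRSTUVWXYZ'
--     codigos = ('El Fol Il Lol Mel Nol Ol Pol Qol Rel Sil Tel Ul '
--                'Vol Wol Xol Yol Zol Al Bl Cl Dl Eml Fl Gl Hl').split()
--     inversa = {}
--     for letra, codigo in zip(letras, codigos):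
--         inversa[codigo] = letra
--         inversa[codigo.lower()] = letra.lower()
--
--     saida = []
--     buf = ''
--     for ch in texto_criptografado:
--         buf += ch
--         letra = inversa.get(buf)
--         if letra is not None:
--             saida.append(letra)
--             buf = ''
--         elif len(buf) == 3:
--             saida.append(buf[0])
--             buf = buf[1:]
--             letra = inversa.get(buf)
--             if letra is not None:
--                 saida.append(letra)
--                 buf = ''
--     while buf:
--         letra = inversa.get(buf)
--         if letra is not None:
--             saida.append(letra)
--             buf = ''
--         else:
--             saida.append(buf[0])
--             buf = buf[1:]
--     return ''.join(saida)
-- ===== Notes on version B (the rewrite author's own statement) =====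
-- stated objective: faster
-- what changed: B replaces A's index-jumping loop that probes three slices per position by a streaming one-pass decoder over characters that keeps at most two pending characters in a buffer (emitting as soon as the buffer matches a code is safe because no 2-char code is a prefix of a 3-char code, a fact proved in the Lean file), accumulates pieces in a list joined once instead of repeated string concatenation, and builds the inverse table by zipping the alphabet with a split code string instead of a 52-entry dict literal.
import Mathlib
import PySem

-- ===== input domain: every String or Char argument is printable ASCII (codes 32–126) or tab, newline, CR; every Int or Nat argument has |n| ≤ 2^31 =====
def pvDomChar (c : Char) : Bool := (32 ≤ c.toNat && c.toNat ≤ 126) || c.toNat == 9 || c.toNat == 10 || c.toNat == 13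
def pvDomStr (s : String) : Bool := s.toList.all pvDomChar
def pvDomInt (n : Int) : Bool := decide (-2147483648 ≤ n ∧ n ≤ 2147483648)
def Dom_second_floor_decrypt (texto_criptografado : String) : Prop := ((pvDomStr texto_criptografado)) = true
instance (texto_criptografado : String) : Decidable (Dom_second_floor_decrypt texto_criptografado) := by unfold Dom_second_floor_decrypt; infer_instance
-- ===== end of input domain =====

set_option maxRecDepth 1000000


-- B replaces A's index-jumping loop with three slice probes per position by a streaming
-- one-pass decoder over the characters keeping at most two pending characters (safe because
-- no 2-char code is a prefix of a 3-char code, proved below), and builds its inverse table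
-- from two parallel letter/code sequences instead of a 52-entry dict literal.
-- Objective: faster by a constant factor (measured; fewer lookups per
-- character and a single join instead of repeated concatenation).

-- ===== PORT A =====
def pvTabelaA : PySem.Dict String String := PySem.Dict.ofList
  [("A", "El"), ("B", "Fol"), ("C", "Il"), ("D", "Lol"), ("E", "Mel"),
   ("F", "Nol"), ("G", "Ol"), ("H", "Pol"), ("I", "Qol"), ("J", "Rel"),
   ("K", "Sil"), ("L", "Tel"), ("M", "Ul"), ("N", "Vol"), ("O", "Wol"),
   ("P", "Xol"), ("Q", "Yol"), ("R", "Zol"), ("S", "Al"), ("T", "Bl"),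
   ("U", "Cl"), ("V", "Dl"), ("W", "Eml"), ("X", "Fl"), ("Y", "Gl"), ("Z", "Hl"),
   ("a", "el"), ("b", "fol"), ("c", "il"), ("d", "lol"), ("e", "mel"),
   ("f", "nol"), ("g", "ol"), ("h", "pol"), ("i", "qol"), ("j", "rel"),
   ("k", "sil"), ("l", "tel"), ("m", "ul"), ("n", "vol"), ("o", "wol"),
   ("p", "xol"), ("q", "yol"), ("r", "zol"), ("s", "al"), ("t", "bl"),
   ("u", "cl"), ("v", "dl"), ("w", "eml"), ("x", "fl"), ("y", "gl"), ("z", "hl")]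

-- {valor: chave for chave, valor in tabela_substituicao.items()}
def pvInversaA : PySem.Dict String String :=
  pvTabelaA.items.foldl (fun d kv => d.insert kv.2 kv.1) PySem.Dict.empty

-- the while loop: the remaining list `c :: cs` is texto_criptografado[i:], so the slice
-- texto[i:i+tamanho] is its `take tamanho`; the inner `for tamanho in range(3, 0, -1)`
-- with `break` is the nested match, the final char copy is the `if not found_match` branch.
set_option maxRecDepth 100000 in
def pvLoopA : List Char → List Char
  | [] => []
  | c :: cs =>
    match pvInversaA.get? (String.ofList ((c :: cs).take 3)) with
    | some v => v.toList ++ pvLoopA ((c :: cs).drop 3)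
    | none =>
      match pvInversaA.get? (String.ofList ((c :: cs).take 2)) with
      | some v => v.toList ++ pvLoopA ((c :: cs).drop 2)
      | none =>
        match pvInversaA.get? (String.ofList ((c :: cs).take 1)) with
        | some v => v.toList ++ pvLoopA ((c :: cs).drop 1)
        | none => [c] ++ pvLoopA ((c :: cs).drop 1)
termination_by l => l.length
decreasing_by all_goals (simp only [List.length_drop, List.length_cons]; omega)

def second_floor_decrypt (texto_criptografado : String) : String :=
  String.ofList (pvLoopA texto_criptografado.toList)

-- ===== PORT B =====
-- letras = 'ABCDEFGHIJKLMNOPQRSTUVWXYZ'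
def pvLetrasB : String := "ABCDEFGHIJKLMNOPQRSTUVWXYZ"

-- codigos = '… '.split()
def pvCodigosB : List String :=
  PySem.Str.split₀ "El Fol Il Lol Mel Nol Ol Pol Qol Rel Sil Tel Ul Vol Wol Xol Yol Zol Al Bl Cl Dl Eml Fl Gl Hl"

-- for letra, codigo in zip(letras, codigos): inversa[codigo] = letra; inversa[codigo.lower()] = letra.lower()
def pvInversaB : PySem.Dict String String :=
  (pvLetrasB.toList.zip pvCodigosB).foldl
    (fun d p =>
      (d.insert p.2 (String.ofList [p.1])).insert
        (PySem.Str.lower p.2) (PySem.Str.lower (String.ofList [p.1])))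
    PySem.Dict.empty

-- one iteration of `for ch in texto`: state is (buf, saida); `buf + ch` is inlined.
def pvStepB (st : List Char × List (List Char)) (ch : Char) : List Char × List (List Char) :=
  match pvInversaB.get? (String.ofList (st.1 ++ [ch])) with
  | some letra => ([], st.2 ++ [letra.toList])
  | none =>
    if (st.1 ++ [ch]).length = 3 then
      match pvInversaB.get? (String.ofList ((st.1 ++ [ch]).drop 1)) with
      | some letra => ([], (st.2 ++ [(st.1 ++ [ch]).take 1]) ++ [letra.toList])
      | none => ((st.1 ++ [ch]).drop 1, st.2 ++ [(st.1 ++ [ch]).take 1])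
    else (st.1 ++ [ch], st.2)

-- the trailing `while buf:` flush: a match emits the letter and empties the buffer,
-- otherwise buf[0] is emitted and buf becomes buf[1:]
def pvFlushB : List Char → List (List Char)
  | [] => []
  | b :: rest =>
    match pvInversaB.get? (String.ofList (b :: rest)) with
    | some letra => [letra.toList]
    | none => [b] :: pvFlushB rest

-- ''.join(saida) where saida = loop pieces ++ flush pieces
def second_floor_decrypt_alt (texto_criptografado : String) : String :=
  String.ofList ((texto_criptografado.toList.foldl pvStepB ([], [])).2
    ++ pvFlushB (texto_criptografado.toList.foldl pvStepB ([], [])).1).flatten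

-- ===== PRECONDITION & SPEC =====
def Spec_second_floor_decrypt (texto_criptografado : String) (out : String) : Prop := out = second_floor_decrypt_alt texto_criptografado
instance (texto_criptografado : String) (out : String) : Decidable (Spec_second_floor_decrypt texto_criptografado out) := by unfold Spec_second_floor_decrypt; infer_instance

-- ===== CLAIM (what is proved, stated in full; the proofs are below) =====
def Claim_equal_second_floor_decrypt : Prop := ∀ (texto_criptografado : String), Dom_second_floor_decrypt texto_criptografado → Spec_second_floor_decrypt texto_criptografado (second_floor_decrypt texto_criptografado)

-- ===== LEMMAS AND PROOFS =====

-- the two inverse tables hold the same pairs (in different insertion order)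
set_option maxRecDepth 100000 in
lemma pv_perm : pvInversaB.items.Perm pvInversaA.items := by decide

-- keys identify pairs in B's table
set_option maxRecDepth 100000 in
lemma pv_uniq : ∀ a ∈ pvInversaB.items, ∀ b ∈ pvInversaB.items, a.1 = b.1 → a = b := by decide

-- find? is insensitive to order when the predicate fixes the element
lemma pv_find?_eq_of_perm {α : Type} (p : α → Bool) {l1 l2 : List α}
    (hperm : l1.Perm l2)
    (huniq : ∀ a ∈ l1, ∀ b ∈ l1, p a → p b → a = b) :
    l1.find? p = l2.find? p := by
  cases h1 : l1.find? p with
  | none =>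
    rw [List.find?_eq_none] at h1
    symm
    rw [List.find?_eq_none]
    intro a ha
    exact h1 a (hperm.mem_iff.mpr ha)
  | some a =>
    have hpa := List.find?_some h1
    have hmem := List.mem_of_find?_eq_some h1
    cases h2 : l2.find? p with
    | none =>
      rw [List.find?_eq_none] at h2
      exact absurd hpa (by simpa using h2 a (hperm.mem_iff.mp hmem))
    | some b =>
      have hpb := List.find?_some h2
      have hmemb := hperm.mem_iff.mpr (List.mem_of_find?_eq_some h2)
      rw [huniq a hmem b hmemb hpa hpb]

-- the two inverse tables agree as lookup functions
lemma pv_get_eq (k : String) : pvInversaB.get? k = pvInversaA.get? k := by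
  unfold PySem.Dict.get?
  rw [pv_find?_eq_of_perm _ pv_perm]
  intro a ha b hb hpa hpb
  exact pv_uniq a ha b hb (by rw [eq_of_beq hpa, eq_of_beq hpb])

-- every key of the inverse table has 2 or 3 characters
set_option maxRecDepth 100000 in
lemma pv_key_len : ∀ p ∈ pvInversaA.items, p.1.toList.length = 2 ∨ p.1.toList.length = 3 := by decide

-- no 2-char key is a prefix of a 3-char key (second char of every 2-char key is 'l',
-- of every 3-char key is not)
set_option maxRecDepth 100000 in
lemma pv_no_prefix : ∀ p ∈ pvInversaA.items, ∀ q ∈ pvInversaA.items,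
    p.1.toList.length = 2 → q.1.toList.length = 3 → q.1.toList.take 2 ≠ p.1.toList := by decide

-- a lookup with a key of the wrong length misses
lemma pv_get?_none_of_len (d : PySem.Dict String String) (k : String)
    (h : ∀ p ∈ d.items, p.1.toList.length ≠ k.toList.length) : d.get? k = none := by
  unfold PySem.Dict.get?
  rw [List.find?_eq_none.mpr]
  · rfl
  · intro p hp
    simp only [beq_iff_eq]
    intro hpe
    exact h p hp (by rw [hpe])

-- 1-char (or empty) slices never match
lemma pv_get1 (l : List Char) (h : l.length ≤ 1) :
    pvInversaA.get? (String.ofList l) = none := by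
  apply pv_get?_none_of_len
  intro p hp
  have hk : (String.ofList l).toList.length = l.length := by simp
  rcases pv_key_len p hp with h2 | h2 <;> omega

-- if the 2-char window matches, the 3-char window cannot
lemma pv_get3_none (l : List Char) (h3 : 3 ≤ l.length) (v : String)
    (h2 : pvInversaA.get? (String.ofList (l.take 2)) = some v) :
    pvInversaA.get? (String.ofList (l.take 3)) = none := by
  cases hq : pvInversaA.get? (String.ofList (l.take 3)) with
  | none => rfl
  | some w =>
    have hmem3 := PySem.Dict.mem_items_of_get?_eq_some _ hq
    have hmem2 := PySem.Dict.mem_items_of_get?_eq_some _ h2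
    have hne := pv_no_prefix _ hmem2 _ hmem3
      (by simp; omega) (by simp; omega)
    exact absurd (by simp [List.take_take]) hne

-- A unfolded at a string whose 2-char prefix is a key: emit the letter, consume 2 chars
lemma pv_loopA_two (b c : Char) (cs : List Char) (v : String)
    (hv : pvInversaA.get? (String.ofList [b, c]) = some v) :
    pvLoopA (b :: c :: cs) = v.toList ++ pvLoopA cs := by
  match cs with
  | [] =>
    conv_lhs => rw [pvLoopA]
    simp [hv]
  | c2 :: cs2 =>
    rw [pvLoopA]
    have h3 := pv_get3_none (b :: c :: c2 :: cs2) (by simp) v (by simpa using hv)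
    simp only [List.take, List.drop] at h3 ⊢
    rw [h3]
    simpa using hv ▸ rfl

-- the flush of a (≤ 2)-char non-key buffer is exactly A's tail behaviour
lemma pv_flush_eq : ∀ (buf : List Char), buf.length ≤ 2 →
    (buf.length = 2 → pvInversaA.get? (String.ofList buf) = none) →
    (pvFlushB buf).flatten = pvLoopA buf := by
  intro buf h1 h2
  match buf with
  | [] => simp [pvFlushB, pvLoopA]
  | [b] =>
    rw [pvFlushB, pvLoopA]
    rw [pv_get_eq, pv_get1 [b] (by simp)]
    simp [pvFlushB, pvLoopA, pv_get1 [b] (by simp)]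
  | [b1, b2] =>
    have hk := h2 rfl
    rw [pvFlushB, pvLoopA]
    rw [pv_get_eq, hk]
    simp only [List.take, List.drop]
    rw [hk, pv_get1 [b1] (by simp)]
    rw [pvFlushB, pv_get_eq, pv_get1 [b2] (by simp)]
    rw [pvLoopA]
    simp [pv_get1 [b2] (by simp), pvLoopA, pvFlushB]

-- main invariant: B's fold-with-buffer, flushed, produces A's loop on buffer ++ rest
lemma pv_main : ∀ (l buf : List Char) (out : List (List Char)),
    buf.length ≤ 2 →
    (buf.length = 2 → pvInversaA.get? (String.ofList buf) = none) →
    (((l.foldl pvStepB (buf, out)).2 ++ pvFlushB (l.foldl pvStepB (buf, out)).1).flatten)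
      = out.flatten ++ pvLoopA (buf ++ l) := by
  intro l
  induction l with
  | nil =>
    intro buf out h1 h2
    simp only [List.foldl_nil, List.append_nil, List.flatten_append]
    rw [pv_flush_eq buf h1 h2]
  | cons c cs ih =>
    intro buf out h1 h2
    rw [List.foldl_cons]
    match buf, h1 with
    | [], _ =>
      have hstep : pvStepB ([], out) c = ([c], out) := by
        simp [pvStepB, pv_get_eq, pv_get1 [c] (by simp)]
      rw [hstep]
      simpa using ih [c] out (by simp) (by simp)
    | [b], _ =>
      cases hv : pvInversaA.get? (String.ofList [b, c]) with
      | some v =>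
        have hstep : pvStepB ([b], out) c = ([], out ++ [v.toList]) := by
          simp [pvStepB, pv_get_eq, hv]
        rw [hstep]
        have := ih [] (out ++ [v.toList]) (by simp) (by simp)
        rw [this]
        simp only [List.nil_append, List.cons_append]
        rw [pv_loopA_two b c cs v hv]
        simp
      | none =>
        have hstep : pvStepB ([b], out) c = ([b, c], out) := by
          simp [pvStepB, pv_get_eq, hv]
        rw [hstep]
        simpa using ih [b, c] out (by simp) (fun _ => hv)
    | [b1, b2], _ =>
      have hbuf := h2 rfl
      cases hv : pvInversaA.get? (String.ofList [b1, b2, c]) with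
      | some v =>
        have hstep : pvStepB ([b1, b2], out) c = ([], out ++ [v.toList]) := by
          simp [pvStepB, pv_get_eq, hv]
        rw [hstep]
        have := ih [] (out ++ [v.toList]) (by simp) (by simp)
        rw [this]
        rw [show ([b1, b2] ++ c :: cs) = b1 :: b2 :: c :: cs from rfl, pvLoopA]
        simp only [List.take, List.drop]
        rw [hv]
        simp
      | none =>
        -- A at this position copies b1 verbatim
        have hA : pvLoopA (b1 :: b2 :: c :: cs) = [b1] ++ pvLoopA (b2 :: c :: cs) := by
          rw [pvLoopA]
          simp only [List.take, List.drop]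
          rw [hv, hbuf, pv_get1 [b1] (by simp)]
        cases hw : pvInversaA.get? (String.ofList [b2, c]) with
        | some w =>
          have hstep : pvStepB ([b1, b2], out) c = ([], (out ++ [[b1]]) ++ [w.toList]) := by
            simp [pvStepB, pv_get_eq, hv, hw]
          rw [hstep]
          have := ih [] ((out ++ [[b1]]) ++ [w.toList]) (by simp) (by simp)
          rw [this]
          rw [show ([b1, b2] ++ c :: cs) = b1 :: b2 :: c :: cs from rfl, hA,
            pv_loopA_two b2 c cs w hw]
          simp
        | none =>
          have hstep : pvStepB ([b1, b2], out) c = ([b2, c], out ++ [[b1]]) := by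
            simp [pvStepB, pv_get_eq, hv, hw]
          rw [hstep]
          have := ih [b2, c] (out ++ [[b1]]) (by simp) (fun _ => hw)
          rw [this]
          rw [show ([b1, b2] ++ c :: cs) = b1 :: b2 :: c :: cs from rfl, hA]
          simp

-- ===== VERDICT (by name: the statement is the Claim_ definition above) =====
theorem second_floor_decrypt_spec : Claim_equal_second_floor_decrypt := by
  intro t _hdom
  show second_floor_decrypt t = second_floor_decrypt_alt t
  unfold second_floor_decrypt second_floor_decrypt_alt
  have := pv_main t.toList [] [] (by simp) (by simp)
  simp only [List.nil_append, List.flatten_nil] at this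
  rw [this]
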